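-- pv_equiv track=rewrite | github.com/and1229/Graber | report_core.py | _join_html_parts
-- ===== SOURCE A (Python) =====
-- def _join_html_parts(parts: list[str], max_len: int = 4096) -> str:
--     """Собирает HTML без разрыва внутри кусков (каждый кусок — целые <pre>/<code>/строки)."""
--     footer = (
--         "\n\n<i>Часть разделов убрана по лимиту Telegram; полные данные — в следующем "
--         "сообщении (JSON).</i>"
--     )
--     full = "\n".join(parts)
--     if len(full) <= max_len:
--         return full
--     budget = max_len - len(footer) - 4
--     chosen: list[str] = []
--     n = 0
--     for p in parts:
--         extra = len(p) + (1 if chosen else 0)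
--         if n + extra > budget:
--             break
--         chosen.append(p)
--         n += extra
--     if not chosen:
--         return (
--             "<b>📍 Отчёт Graber</b>\n"
--             "<i>Объём данных превышает лимит одного сообщения; смотрите JSON ниже.</i>"
--         )
--     return "\n".join(chosen) + footer
-- ===== SOURCE B (Python) =====
-- def _join_html_parts(parts: list[str], max_len: int = 4096) -> str:
--     """Prefix-sum variant: build cumulative joined lengths, then pick the largest fitting prefix."""
--     footer = (
--         "\n\n<i>Часть разделов убрана по лимиту Telegram; полные данные — в следующем "
--         "сообщении (JSON).</i>"
--     )
--     full = "\n".join(parts)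
--     if len(full) <= max_len:
--         return full
--     budget = max_len - len(footer) - 4
--     # cum[i] = len("\n".join(parts[:i+1])) + 1  (each part charged len+1 for its separator)
--     cum = []
--     total = 0
--     for p in parts:
--         total += len(p) + 1
--         cum.append(total)
--     k = 0
--     while k < len(cum) and cum[k] - 1 <= budget:
--         k += 1
--     if k == 0:
--         return (
--             "<b>📍 Отчёт Graber</b>\n"
--             "<i>Объём данных превышает лимит одного сообщения; смотрите JSON ниже.</i>"
--         )
--     return "\n".join(parts[:k]) + footer
-- ===== Notes on version B (the rewrite author's own statement) =====
-- stated objective: alternative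
-- what changed: Replaced A's greedy accumulate-and-break loop over (chosen, n) by first building a cumulative-length table (cum[i] = joined length of parts[:i+1] plus one) and then scanning it for the largest prefix count k that fits the budget, returning '\n'.join(parts[:k]) + footer.
import Mathlib
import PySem

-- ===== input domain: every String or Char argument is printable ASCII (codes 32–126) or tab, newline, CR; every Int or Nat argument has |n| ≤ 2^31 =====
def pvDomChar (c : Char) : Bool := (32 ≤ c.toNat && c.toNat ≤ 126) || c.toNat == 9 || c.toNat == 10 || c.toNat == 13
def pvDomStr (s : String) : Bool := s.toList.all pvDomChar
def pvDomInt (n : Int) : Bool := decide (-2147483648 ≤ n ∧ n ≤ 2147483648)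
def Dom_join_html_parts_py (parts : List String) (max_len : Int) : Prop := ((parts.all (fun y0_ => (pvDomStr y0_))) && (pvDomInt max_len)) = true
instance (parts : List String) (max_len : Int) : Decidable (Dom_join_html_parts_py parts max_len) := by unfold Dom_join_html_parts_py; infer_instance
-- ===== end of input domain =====

-- B replaces A's greedy accumulate-and-break loop by a cumulative-length table plus a scan
-- for the largest fitting prefix (objective: alternative decomposition, same cost).

-- ===== PORT A =====
def pvFooter : String :=
  "\n\n<i>Часть разделов убрана по лимиту Telegram; полные данные — в следующем сообщении (JSON).</i>"

def pvFallback : String :=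
  "<b>📍 Отчёт Graber</b>\n<i>Объём данных превышает лимит одного сообщения; смотрите JSON ниже.</i>"

-- A's 'for p in parts: … break' loop with its state (chosen, n)
def pvALoop (budget : Int) : List String → List String → Int → List String
  | [], chosen, _ => chosen
  | p :: ps, chosen, n =>
    let extra : Int := PySem.Str.len p + (if chosen = [] then 0 else 1)
    if n + extra > budget then chosen
    else pvALoop budget ps (chosen ++ [p]) (n + extra)

def join_html_parts_py (parts : List String) (max_len : Int) : String :=
  let full := PySem.Str.join "\n" parts
  if PySem.Str.len full ≤ max_len then full
  else
    let budget := max_len - PySem.Str.len pvFooter - 4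
    let chosen := pvALoop budget parts [] 0
    if chosen = [] then pvFallback
    else PySem.Str.join "\n" chosen ++ pvFooter

-- ===== PORT B =====
-- Source B's cumulative-table loop: state (total, cum)
def pvBCum (parts : List String) : Int × List Int :=
  parts.foldl (fun acc p =>
    (acc.1 + PySem.Str.len p + 1, acc.2 ++ [acc.1 + PySem.Str.len p + 1])) (0, [])

-- Source B's 'while k < len(cum) and cum[k] - 1 <= budget: k += 1'
def pvBK (cum : List Int) (budget : Int) (k : Nat) : Nat :=
  if h : k < cum.length ∧ PySem.List.pyGetD cum (k : Int) 0 - 1 ≤ budget then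
    pvBK cum budget (k + 1)
  else k
termination_by cum.length - k
decreasing_by omega

def join_html_parts_py_alt (parts : List String) (max_len : Int) : String :=
  let full := PySem.Str.join "\n" parts
  if PySem.Str.len full ≤ max_len then full
  else
    let budget := max_len - PySem.Str.len pvFooter - 4
    let cum := (pvBCum parts).2
    let k := pvBK cum budget 0
    if k = 0 then pvFallback
    else PySem.Str.join "\n" (parts.take k) ++ pvFooter

-- ===== PRECONDITION & SPEC =====
def Spec_join_html_parts_py (parts : List String) (max_len : Int) (out : String) : Prop := out = join_html_parts_py_alt parts max_len
instance (parts : List String) (max_len : Int) (out : String) : Decidable (Spec_join_html_parts_py parts max_len out) := by unfold Spec_join_html_parts_py; infer_instance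

-- ===== CLAIM (what is proved, stated in full; the proofs are below) =====
def Claim_equal_join_html_parts_py : Prop := ∀ (parts : List String) (max_len : Int), Dom_join_html_parts_py parts max_len → Spec_join_html_parts_py parts max_len (join_html_parts_py parts max_len)

-- ===== LEMMAS AND PROOFS =====

-- common reference: the longest prefix whose (len+1)-costs fit in b
def pvTakeK : List String → Int → List String
  | [], _ => []
  | p :: ps, b => if PySem.Str.len p + 1 > b then [] else p :: pvTakeK ps (b - PySem.Str.len p - 1)

-- the running totals t + Σ(len+1)
def pvScan : List String → Int → List Int
  | [], _ => []
  | p :: ps, t => (t + PySem.Str.len p + 1) :: pvScan ps (t + PySem.Str.len p + 1)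

-- prefix count of entries with x - 1 ≤ budget (stopping at the first failure)
def pvKC (budget : Int) : List Int → Nat
  | [] => 0
  | x :: xs => if x - 1 ≤ budget then pvKC budget xs + 1 else 0

theorem pvALoop_ne (budget : Int) (ps : List String) (chosen : List String) (n : Int)
    (h : chosen ≠ []) : pvALoop budget ps chosen n = chosen ++ pvTakeK ps (budget - n) := by
  induction ps generalizing chosen n with
  | nil => simp [pvALoop, pvTakeK]
  | cons p ps ih =>
    simp only [pvALoop, pvTakeK, if_neg h]
    by_cases hc : n + (PySem.Str.len p + 1) > budget
    · rw [if_pos hc, if_pos (by omega)]; simp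
    · rw [if_neg hc, if_neg (by omega), ih _ _ (by simp)]
      simp only [List.append_assoc, List.singleton_append]
      congr 2
      ring_nf

theorem pvALoop_top (budget : Int) (parts : List String) :
    pvALoop budget parts [] 0 = pvTakeK parts (budget + 1) := by
  cases parts with
  | nil => simp [pvALoop, pvTakeK]
  | cons p ps =>
    simp only [pvALoop, pvTakeK, if_true]
    by_cases hc : 0 + (PySem.Str.len p + 0) > budget
    · rw [if_pos hc, if_pos (by omega)]
    · rw [if_neg hc, if_neg (by omega), pvALoop_ne _ _ _ _ (by simp)]
      simp only [List.nil_append, List.singleton_append]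
      congr 2
      ring_nf

theorem pvBCum_snd (ps : List String) (t : Int) (c : List Int) :
    (ps.foldl (fun acc p =>
      (acc.1 + PySem.Str.len p + 1, acc.2 ++ [acc.1 + PySem.Str.len p + 1])) (t, c)).2
    = c ++ pvScan ps t := by
  induction ps generalizing t c with
  | nil => simp [pvScan]
  | cons p ps ih => rw [List.foldl_cons, ih]; simp [pvScan]

theorem pvBK_eq (budget : Int) (xs pre : List Int) :
    pvBK (pre ++ xs) budget pre.length = pre.length + pvKC budget xs := by
  induction xs generalizing pre with
  | nil =>
    rw [pvBK]
    simp [pvKC]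
  | cons x xs ih =>
    rw [pvBK]
    have hget : PySem.List.pyGetD (pre ++ x :: xs) (pre.length : Int) 0 = x := by
      rw [PySem.List.pyGetD_natCast]
      simp [List.getD]
    by_cases hx : x - 1 ≤ budget
    · rw [dif_pos ⟨by simp, by rw [hget]; exact hx⟩]
      have h2 : pre.length + 1 = (pre ++ [x]).length := by simp
      rw [h2]
      have h3 : pre ++ x :: xs = (pre ++ [x]) ++ xs := by simp
      rw [h3, ih]
      simp [pvKC, hx]
      omega
    · rw [dif_neg (by rw [hget]; tauto)]
      simp [pvKC, hx]

theorem pvScan_take (budget : Int) (ps : List String) (t : Int) :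
    ps.take (pvKC budget (pvScan ps t)) = pvTakeK ps (budget + 1 - t) := by
  induction ps generalizing t with
  | nil => simp [pvScan, pvKC, pvTakeK]
  | cons p ps ih =>
    simp only [pvScan, pvKC, pvTakeK]
    by_cases hx : t + PySem.Str.len p + 1 - 1 ≤ budget
    · rw [if_pos hx, if_neg (by omega)]
      simp only [List.take_succ_cons]
      rw [ih]
      congr 1
      ring_nf
    · rw [if_neg hx, if_pos (by omega)]
      simp

-- ===== VERDICT (by name: the statement is the Claim_ definition above) =====
theorem join_html_parts_py_spec : Claim_equal_join_html_parts_py := by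
  intro parts max_len _
  unfold Spec_join_html_parts_py join_html_parts_py join_html_parts_py_alt
  simp only []
  by_cases hfull : PySem.Str.len (PySem.Str.join "\n" parts) ≤ max_len
  · rw [if_pos hfull, if_pos hfull]
  · rw [if_neg hfull, if_neg hfull]
    set budget := max_len - PySem.Str.len pvFooter - 4 with hb
    have hcum : (pvBCum parts).2 = pvScan parts 0 := by
      unfold pvBCum; simpa using pvBCum_snd parts 0 []
    have hk : pvBK (pvBCum parts).2 budget 0 = pvKC budget (pvScan parts 0) := by
      rw [hcum]
      simpa using pvBK_eq budget (pvScan parts 0) []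
    have hchosen : pvALoop budget parts [] 0 = parts.take (pvBK (pvBCum parts).2 budget 0) := by
      rw [hk, pvALoop_top]
      rw [pvScan_take budget parts 0]
      congr 1
      ring_nf
    by_cases hz : pvBK (pvBCum parts).2 budget 0 = 0
    · rw [if_pos hz, if_pos (by rw [hchosen, hz]; simp)]
    · rw [if_neg hz]
      rw [if_neg (by
        rw [hchosen]
        intro hemp
        rcases List.take_eq_nil_iff.mp hemp with h | h
        · exact hz h
        · apply hz
          rw [hk]
          subst h
          simp [pvScan, pvKC])]
      rw [hchosen]
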